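-- pv_equiv track=rewrite | github.com/hongii/programmers_python | LV 2/후보키.py | solution
-- ===== SOURCE A (Python) =====
-- from itertools import combinations
-- from itertools import combinations
--
-- def solution(relation):
--     res = set()
--     for i in range(1, len(relation[0])+1):
--         # 가능한 키 조합 만들기(idx 조합으로 생성)
--         cb = list(combinations(range(len(relation[0])), i))
--
--         for c in cb:
--             tmp = set()
--             # 관계형 데이터베이스에서 데이터 한줄씩(row) 뽑아옴
--             for info in relation:
--                 l = []
--
--                 # 키 조합 idx를 하나씩 뽑아와서 이 idx에 해당하는 data를 리스트 l에 집어넣음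
--                 for j in c:
--                     l.append(info[j])
--                 tmp.add(tuple(l)) # tmp집합에 키조합으로 뽑아온 데이터 리스트를 집어넣음 (set의 특징: 중복된 데이터가 있다면 넣지 않는다)
--
--             # 중복된 데이터가 없는 경우 -> 후보키 가능성 있음(유일성 판단)
--             if len(tmp) == len(relation):
--                 if len(res) == 0:
--                     res.add(c)
--
--                 # 유일성 만족하는 키 조합 중에서 후보키 조건을 만족하기 위한 최소성 판단
--                 for s in res:
--                     if set(s).issubset(set(c)):
--                         break
--                 else:
--                     res.add(c)
--
--     return len(res)
-- ===== SOURCE B (Python) =====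
-- from itertools import combinations
--
--
-- def solution(relation):
--     m = len(relation[0])
--     # Phase 1: collect every column-index combination that is a superkey
--     # (its row projection has no duplicates).
--     uniq = [c for i in range(1, m + 1)
--               for c in combinations(range(m), i)
--               if len({tuple(row[j] for j in c) for row in relation}) == len(relation)]
--     uniqset = set(uniq)
--     # Phase 2: count the minimal ones: no proper sub-combination is itself a superkey.
--     return sum(1 for c in uniq
--                  if not any(sub in uniqset
--                             for k in range(1, len(c))
--                             for sub in combinations(c, k)))
-- ===== Notes on version B (the rewrite author's own statement) =====
-- stated objective: alternative
-- what changed: B first collects the full set of unique (superkey) column combinations in one pass and then, in a separate pass, counts those with no proper sub-combination in that set, instead of A's interleaved minimality bookkeeping against a growing res set.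
import Mathlib
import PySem

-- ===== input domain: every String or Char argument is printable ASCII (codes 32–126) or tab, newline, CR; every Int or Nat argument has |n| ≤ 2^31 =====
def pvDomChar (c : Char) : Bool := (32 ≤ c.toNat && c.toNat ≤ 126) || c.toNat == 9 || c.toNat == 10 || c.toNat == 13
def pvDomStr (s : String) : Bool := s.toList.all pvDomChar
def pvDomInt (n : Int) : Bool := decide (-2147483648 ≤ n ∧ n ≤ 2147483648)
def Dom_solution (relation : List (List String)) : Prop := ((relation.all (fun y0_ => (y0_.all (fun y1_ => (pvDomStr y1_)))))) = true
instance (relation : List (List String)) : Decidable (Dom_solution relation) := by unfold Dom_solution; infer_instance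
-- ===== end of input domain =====

-- B re-implements A as two separate phases (collect all superkeys, then count the
-- minimal ones); equivalence of the return values is proved on non-empty relations
-- whose rows are at least as long as the first row (elsewhere A raises IndexError).

-- ===== PORT A =====
-- l = []; for j in c: l.append(info[j])
def pvProjA (info : List String) (c : List Int) : List String :=
  c.foldl (fun l j => l ++ [PySem.List.pyGetD info j ""]) []

-- the body of A's `for c in cb` loop
def pvStepA (relation : List (List String)) (res : PySem.Set (List Int)) (c : List Int) :
    PySem.Set (List Int) :=
  let tmp : PySem.Set (List String) :=
    relation.foldl (fun tmp info => PySem.Set.add tmp (pvProjA info c)) PySem.Set.empty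
  if PySem.Set.len tmp == relation.length then
    let res1 := if PySem.Set.len res == 0 then PySem.Set.add res c else res
    -- for s in res: if set(s).issubset(set(c)): break / else: res.add(c)
    if res1.any (fun s => PySem.Set.issubset (PySem.Set.ofList s) (PySem.Set.ofList c)) then res1
    else PySem.Set.add res1 c
  else res

def solution (relation : List (List String)) : Int :=
  let n : Nat := (PySem.List.pyGetD relation 0 []).length
  let res : PySem.Set (List Int) :=
    (PySem.List.pyRange 1 ((n : Int) + 1) 1).foldl
      (fun res i =>
        let cb := PySem.List.combinations (PySem.List.pyRange 0 (n : Int) 1) i.toNat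
        cb.foldl (pvStepA relation) res)
      PySem.Set.empty
  (PySem.Set.len res : Int)

-- ===== PORT B =====
-- tuple(row[j] for j in c)
def pvProjB (c : List Int) (row : List String) : List String :=
  c.map (fun j => PySem.List.pyGetD row j "")

-- len({tuple(row[j] for j in c) for row in relation}) == len(relation)
def pvIsUniq (relation : List (List String)) (c : List Int) : Bool :=
  PySem.Set.len (PySem.Set.ofList (relation.map (pvProjB c))) == relation.length

def solution_alt (relation : List (List String)) : Int :=
  let m : Nat := (PySem.List.pyGetD relation 0 []).length
  let uniq : List (List Int) :=
    (PySem.List.pyRange 1 ((m : Int) + 1) 1).flatMap (fun i =>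
      (PySem.List.combinations (PySem.List.pyRange 0 (m : Int) 1) i.toNat).filter
        (pvIsUniq relation))
  let uniqset : PySem.Set (List Int) := PySem.Set.ofList uniq
  ((uniq.filter (fun c =>
      !((PySem.List.pyRange 1 (c.length : Int) 1).any (fun k =>
          (PySem.List.combinations c k.toNat).any
            (fun sub => PySem.Set.contains uniqset sub))))).length : Int)

-- ===== PRECONDITION & SPEC =====
-- Pre_ excludes exactly the inputs where Python A raises IndexError: the empty
-- relation (relation[0]) and rows shorter than the first row (info[j]).
def Pre_solution (relation : List (List String)) : Prop :=
  relation ≠ [] ∧ ∀ row ∈ relation, relation.headI.length ≤ row.length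
instance (relation : List (List String)) : Decidable (Pre_solution relation) := by
  unfold Pre_solution; infer_instance

def pvWitness_solution : List (List String) := [["a", "b"], ["a", "c"]]

def Spec_solution (relation : List (List String)) (out : Int) : Prop := out = solution_alt relation
instance (relation : List (List String)) (out : Int) : Decidable (Spec_solution relation out) := by
  unfold Spec_solution; infer_instance

-- ===== CLAIM (what is proved, stated in full; the proofs are below) =====
def Claim_equal_solution : Prop := ∀ (relation : List (List String)),
  Dom_solution relation → Pre_solution relation → Spec_solution relation (solution relation)

-- ===== LEMMAS AND PROOFS =====

-- column-index range range(m)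
def pvR (m : Nat) : List Int := PySem.List.pyRange 0 (m : Int) 1

-- all candidate index combinations, in A's/B's processing order: sizes 1..m
def pvAll (m : Nat) : List (List Int) :=
  (List.range m).flatMap (fun k => PySem.List.combinations (pvR m) (k + 1))

-- "c is a minimal superkey": unique, and no proper nonempty sublist is unique
def pvMin (U : List Int → Bool) (c : List Int) : Bool :=
  U c && c.sublists.all (fun s => decide (s = []) || decide (s = c) || !U s)

-- A's per-combination step, with the projection/tmp work abstracted into U
def pvStep (U : List Int → Bool) (res : PySem.Set (List Int)) (c : List Int) :
    PySem.Set (List Int) :=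
  if U c then
    if res.any (fun s => PySem.Set.issubset (PySem.Set.ofList s) (PySem.Set.ofList c)) then res
    else PySem.Set.add res c
  else res

lemma pvProj_eq (info : List String) (c : List Int) : pvProjA info c = pvProjB c info := by
  simpa [pvProjA, pvProjB] using
    PySem.List.foldl_append_singleton_eq_map (fun j => PySem.List.pyGetD info j "") c []

lemma pvStepA_eq (relation : List (List String)) (res : PySem.Set (List Int)) (c : List Int) :
    pvStepA relation res c = pvStep (pvIsUniq relation) res c := by
  have htmp : relation.foldl (fun tmp info => PySem.Set.add tmp (pvProjA info c))
      PySem.Set.empty = PySem.Set.ofList (relation.map (pvProjB c)) := by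
    rw [show relation.map (pvProjB c) = relation.map (fun info => pvProjA info c) by
      simp [pvProj_eq]]
    rw [← PySem.Set.update_map_eq_foldl_add relation (fun info => pvProjA info c)
      PySem.Set.empty, PySem.Set.update_empty]
  have hcond : (PySem.Set.len (PySem.Set.ofList (relation.map (pvProjB c)))
      == ((relation.length : Nat) : Int)) = pvIsUniq relation c := rfl
  simp only [pvStepA, htmp, hcond, pvStep]
  cases hU : pvIsUniq relation c
  · simp
  · simp only [if_true]
    by_cases hres : res = []
    · subst hres
      have hsubc : PySem.Set.issubset (PySem.Set.ofList c) (PySem.Set.ofList c) = true :=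
        (PySem.Set.issubset_iff _ _).mpr (fun x hx => hx)
      simp [PySem.Set.len_eq, hsubc]
    · have hlen : (PySem.Set.len res == (0 : Int)) = false := by
        simp [PySem.Set.len_eq]
        exact hres
      rw [hlen]
      simp

lemma pvR_sorted (m : Nat) : (pvR m).Pairwise (· < ·) := by
  rw [pvR, PySem.List.pyRange_zero_natCast]
  exact (List.pairwise_lt_range).map _ (fun {a b} h => by exact_mod_cast h)

lemma pvR_nodup (m : Nat) : (pvR m).Nodup := (pvR_sorted m).imp (fun h => ne_of_lt h)

lemma pvR_length (m : Nat) : (pvR m).length = m := by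
  simp [pvR, PySem.List.pyRange_zero_natCast]

lemma sorted_subset_sublist (R : List Int) (hR : R.Pairwise (· < ·)) :
    ∀ s c : List Int, s.Sublist R → c.Sublist R → (∀ x ∈ s, x ∈ c) → s.Sublist c := by
  induction R with
  | nil =>
      intro s c hs _ _
      exact (List.sublist_nil.mp hs) ▸ List.nil_sublist c
  | cons x R ih =>
      intro s c hs hc hsub
      have hR' : R.Pairwise (· < ·) := hR.of_cons
      have hx : ∀ y ∈ R, x < y := (List.pairwise_cons.mp hR).1
      have hxR : x ∉ R := fun h => lt_irrefl x (hx x h)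
      rcases List.sublist_cons_iff.mp hs with hsR | ⟨s', rfl, hs'⟩
      · rcases List.sublist_cons_iff.mp hc with hcR | ⟨c', rfl, hc'⟩
        · exact ih hR' s c hsR hcR hsub
        · refine (ih hR' s c' hsR hc' ?_).cons x
          intro z hz
          have hzR : z ∈ R := hsR.subset hz
          have : z ≠ x := fun h => hxR (h ▸ hzR)
          rcases List.mem_cons.mp (hsub z hz) with h | h
          · exact absurd h this
          · exact h
      · rcases List.sublist_cons_iff.mp hc with hcR | ⟨c', rfl, hc'⟩
        · exact absurd (hcR.subset (hsub x List.mem_cons_self)) hxR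
        · refine List.cons_sublist_cons.mpr (ih hR' s' c' hs' hc' ?_)
          intro z hz
          have hzR : z ∈ R := hs'.subset hz
          have : z ≠ x := fun h => hxR (h ▸ hzR)
          rcases List.mem_cons.mp (hsub z (List.mem_cons_of_mem x hz)) with h | h
          · exact absurd h this
          · exact h

lemma pvMin_exists (U : List Int → Bool) :
    ∀ (n : Nat) (s : List Int), s.length ≤ n → s ≠ [] → U s = true →
      ∃ d, d.Sublist s ∧ d ≠ [] ∧ pvMin U d = true := by
  intro n
  induction n with
  | zero =>
      intro s hlen hne _
      exact absurd (List.length_eq_zero_iff.mp (Nat.le_zero.mp hlen)) hne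
  | succ n ih =>
      intro s hlen hne hU
      by_cases hmin : pvMin U s = true
      · exact ⟨s, List.Sublist.refl s, hne, hmin⟩
      · have hall : s.sublists.all (fun t => decide (t = []) || decide (t = s) || !U t) = false := by
          have : pvMin U s = false := by simpa using hmin
          rw [pvMin, hU, Bool.true_and] at this
          exact this
        obtain ⟨t, htmem, hp⟩ := List.all_eq_false.mp hall
        have hts : t.Sublist s := List.mem_sublists.mp htmem
        have hp2 : (t ≠ [] ∧ t ≠ s) ∧ U t = true := by simpa using hp
        obtain ⟨⟨htne, htns⟩, htU⟩ := hp2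
        have hlt : t.length < s.length :=
          lt_of_le_of_ne hts.length_le (fun h => htns (hts.eq_of_length h))
        obtain ⟨d, hds, hdne, hdmin⟩ := ih t (by omega) htne htU
        exact ⟨d, hds.trans hts, hdne, hdmin⟩

lemma mem_pvAll (m : Nat) (c : List Int) :
    c ∈ pvAll m ↔ c.Sublist (pvR m) ∧ c ≠ [] := by
  simp only [pvAll, List.mem_flatMap, List.mem_range, PySem.List.mem_combinations_iff]
  constructor
  · rintro ⟨k, hk, hsub, hlen⟩
    exact ⟨hsub, by intro h; simp [h] at hlen⟩
  · rintro ⟨hsub, hne⟩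
    have h1 : 1 ≤ c.length := List.length_pos_iff.mpr hne
    have h2 : c.length ≤ m := by
      have := hsub.length_le; rwa [pvR_length] at this
    exact ⟨c.length - 1, by omega, hsub, by omega⟩

lemma nodup_combinations {l : List Int} (hl : l.Nodup) (r : Nat) :
    (PySem.List.combinations l r).Nodup := by
  induction l generalizing r with
  | nil =>
      cases r with
      | zero => simp [PySem.List.combinations_zero]
      | succ r => simp [PySem.List.combinations_nil_succ]
  | cons x xs ih =>
      cases r with
      | zero => simp [PySem.List.combinations_zero]
      | succ r =>
          rw [PySem.List.combinations_cons_succ, List.nodup_append]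
          have hx : x ∉ xs := (List.nodup_cons.mp hl).1
          have hxs : xs.Nodup := (List.nodup_cons.mp hl).2
          refine ⟨(ih hxs r).map (fun h => by simp_all), ih hxs (r + 1), ?_⟩
          intro a ha b hb hab
          obtain ⟨a', ha', rfl⟩ := List.mem_map.mp ha
          have hbs : b.Sublist xs := (PySem.List.mem_combinations_iff xs (r+1) b).mp hb |>.1
          have : x ∈ b := hab ▸ List.mem_cons_self
          exact hx (hbs.subset this)

lemma nodup_pvAll (m : Nat) : (pvAll m).Nodup := by
  rw [pvAll, List.nodup_flatMap]
  refine ⟨fun k _ => nodup_combinations (pvR_nodup m) (k + 1), ?_⟩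
  refine List.pairwise_lt_range.imp ?_
  intro i j hij c hci hcj
  have hi := (PySem.List.mem_combinations_iff _ _ c).mp hci |>.2
  have hj := (PySem.List.mem_combinations_iff _ _ c).mp hcj |>.2
  omega

lemma pairwise_len_pvAll (m : Nat) :
    (pvAll m).Pairwise (fun a b => a.length ≤ b.length) := by
  rw [pvAll, List.pairwise_flatMap]
  constructor
  · intro k _
    refine List.pairwise_of_forall_mem_list ?_
    intro a ha b hb
    have := (PySem.List.mem_combinations_iff _ _ a).mp ha |>.2
    have := (PySem.List.mem_combinations_iff _ _ b).mp hb |>.2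
    omega
  · refine List.pairwise_lt_range.imp ?_
    intro i j hij a ha b hb
    have := (PySem.List.mem_combinations_iff _ _ a).mp ha |>.2
    have := (PySem.List.mem_combinations_iff _ _ b).mp hb |>.2
    omega

-- the central invariant: A's interleaved fold computes the filter of minimal superkeys
lemma fold_inv (U : List Int → Bool) (R : List Int) (hR : R.Pairwise (· < ·)) :
    ∀ (L Q : List (List Int)),
      (Q ++ L).Nodup →
      (∀ d ∈ Q ++ L, d.Sublist R ∧ d ≠ []) →
      (∀ c ∈ L, ∀ s : List Int, s.Sublist R → s ≠ [] → s.length < c.length → U s = true →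
        s ∈ Q ++ L) →
      L.Pairwise (fun a b => a.length ≤ b.length) →
      L.foldl (pvStep U) (Q.filter (pvMin U)) = (Q ++ L).filter (pvMin U) := by
  intro L
  induction L with
  | nil => intro Q _ _ _ _; simp
  | cons c L' ih =>
      intro Q hnd hsub hcomp hmono
      have hcQ : c ∉ Q := by
        rcases List.nodup_append.mp hnd with ⟨-, -, hdisj⟩
        intro hc
        exact hdisj c hc c List.mem_cons_self rfl
      have hcR : c.Sublist R ∧ c ≠ [] := hsub c (List.mem_append.mpr (Or.inr List.mem_cons_self))
      have hstep : pvStep U (Q.filter (pvMin U)) c = (Q ++ [c]).filter (pvMin U) := by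
        rw [List.filter_append]
        cases hU : U c
        · have hmc : pvMin U c = false := by simp [pvMin, hU]
          simp [pvStep, hU, hmc]
        · cases hmc : pvMin U c
          · -- c unique but not minimal: some earlier minimal key is a subset, A skips c
            have hall : c.sublists.all
                (fun s => decide (s = []) || decide (s = c) || !U s) = false := by
              rw [pvMin, hU, Bool.true_and] at hmc
              exact hmc
            obtain ⟨t, htmem, hp⟩ := List.all_eq_false.mp hall
            have hts : t.Sublist c := List.mem_sublists.mp htmem
            have hp2 : (t ≠ [] ∧ t ≠ c) ∧ U t = true := by simpa using hp
            obtain ⟨⟨htne, htnc⟩, htU⟩ := hp2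
            have hlt : t.length < c.length :=
              lt_of_le_of_ne hts.length_le (fun h => htnc (hts.eq_of_length h))
            obtain ⟨d, hdt, hdne, hdmin⟩ := pvMin_exists U t.length t le_rfl htne htU
            have hdc : d.Sublist c := hdt.trans hts
            have hdlen : d.length < c.length := lt_of_le_of_lt hdt.length_le hlt
            have hdU : U d = true := by
              rw [pvMin, Bool.and_eq_true] at hdmin
              exact hdmin.1
            have hdQ : d ∈ Q := by
              have hmem := hcomp c List.mem_cons_self d (hdc.trans hcR.1) hdne hdlen hdU
              rcases List.mem_append.mp hmem with h | h
              · exact h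
              · rcases List.mem_cons.mp h with h | h
                · subst h; omega
                · have := List.rel_of_pairwise_cons hmono h
                  omega
            have hany : (Q.filter (pvMin U)).any
                (fun s => PySem.Set.issubset (PySem.Set.ofList s) (PySem.Set.ofList c)) = true := by
              refine List.any_eq_true.mpr ⟨d, List.mem_filter.mpr ⟨hdQ, hdmin⟩, ?_⟩
              refine (PySem.Set.issubset_iff _ _).mpr ?_
              intro x hx
              rw [PySem.Set.mem_ofList] at hx ⊢
              exact hdc.subset hx
            simp [pvStep, hU, hany, hmc]
          · -- c is a minimal superkey: no earlier key is a subset, A appends c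
            have hanyf : (Q.filter (pvMin U)).any
                (fun s => PySem.Set.issubset (PySem.Set.ofList s) (PySem.Set.ofList c)) = false := by
              rw [Bool.eq_false_iff]
              intro hany
              obtain ⟨d, hdmem, hdsub⟩ := List.any_eq_true.mp hany
              obtain ⟨hdQ, hdmin⟩ := List.mem_filter.mp hdmem
              have hdss : ∀ x ∈ d, x ∈ c := by
                intro x hx
                have := (PySem.Set.issubset_iff _ _).mp hdsub x ((PySem.Set.mem_ofList _ _).mpr hx)
                exact (PySem.Set.mem_ofList _ _).mp this
              have hdU : U d = true := by
                rw [pvMin, Bool.and_eq_true] at hdmin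
                exact hdmin.1
              have hdR : d.Sublist R ∧ d ≠ [] := hsub d (List.mem_append.mpr (Or.inl hdQ))
              have hdc : d.Sublist c := sorted_subset_sublist R hR d c hdR.1 hcR.1 hdss
              have hdnc : d ≠ c := fun h => hcQ (h ▸ hdQ)
              rw [pvMin, hU, Bool.true_and, List.all_eq_true] at hmc
              have := hmc d (List.mem_sublists.mpr hdc)
              simp [hdR.2, hdnc, hdU] at this
            have hcres : c ∉ Q.filter (pvMin U) := fun h => hcQ (List.mem_filter.mp h).1
            simp [pvStep, hU, hanyf, PySem.Set.add_of_not_mem hcres, hmc]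
      rw [List.foldl_cons, hstep]
      have heq : Q ++ c :: L' = (Q ++ [c]) ++ L' := by simp
      rw [heq] at hnd hsub hcomp ⊢
      refine ih (Q ++ [c]) hnd hsub ?_ hmono.of_cons
      intro c' hc' s hsR hsne hslen hsU
      exact hcomp c' (List.mem_cons_of_mem c hc') s hsR hsne hslen hsU

lemma flat_aux (R : List Int) (m : Nat) :
    (PySem.List.pyRange 1 ((m : Int) + 1) 1).flatMap
        (fun i => PySem.List.combinations R i.toNat) =
      (List.range m).flatMap (fun k => PySem.List.combinations R (k + 1)) := by
  induction m with
  | zero => rfl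
  | succ m ih =>
      rw [show ((m + 1 : Nat) : Int) + 1 = ((m : Int) + 1) + 1 by push_cast; ring,
        PySem.List.pyRange_one_succ_right (by omega), List.range_succ,
        List.flatMap_append, List.flatMap_append, ih]
      have h1 : ((m : Int) + 1).toNat = m + 1 := by omega
      simp [h1]

lemma flat_eq (m : Nat) :
    (PySem.List.pyRange 1 ((m : Int) + 1) 1).flatMap
      (fun i => PySem.List.combinations (PySem.List.pyRange 0 (m : Int) 1) i.toNat) = pvAll m :=
  flat_aux (PySem.List.pyRange 0 (m : Int) 1) m

lemma fold_inv_all (U : List Int → Bool) (m : Nat) :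
    (pvAll m).foldl (pvStep U) PySem.Set.empty = (pvAll m).filter (pvMin U) := by
  have h := fold_inv U (pvR m) (pvR_sorted m) (pvAll m) []
  simp only [List.nil_append, List.filter_nil] at h
  refine h (nodup_pvAll m) (fun d hd => (mem_pvAll m d).mp hd) ?_ (pairwise_len_pvAll m)
  intro c _ s hsR hsne _ _
  exact (mem_pvAll m s).mpr ⟨hsR, hsne⟩

lemma solution_eq_filter (relation : List (List String)) (h : Pre_solution relation) :
    solution relation = (((pvAll relation.headI.length).filter
      (pvMin (pvIsUniq relation))).length : Int) := by
  obtain ⟨r0, rest, rfl⟩ : ∃ r0 rest, relation = r0 :: rest := by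
    cases relation with
    | nil => exact absurd rfl h.1
    | cons r0 rest => exact ⟨r0, rest, rfl⟩
  have hhead : PySem.List.pyGetD (r0 :: rest) 0 [] = r0 := by
    simp [PySem.List.pyGetD_ofNat']
  have hstep : pvStepA (r0 :: rest) = pvStep (pvIsUniq (r0 :: rest)) :=
    funext fun res => funext fun c => pvStepA_eq (r0 :: rest) res c
  simp only [solution, hhead, hstep]
  rw [← List.foldl_flatMap, flat_eq, fold_inv_all]
  simp [PySem.Set.len_eq]

lemma solution_alt_eq_filter (relation : List (List String)) (h : Pre_solution relation) :
    solution_alt relation = (((pvAll relation.headI.length).filter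
      (pvMin (pvIsUniq relation))).length : Int) := by
  obtain ⟨r0, rest, rfl⟩ : ∃ r0 rest, relation = r0 :: rest := by
    cases relation with
    | nil => exact absurd rfl h.1
    | cons r0 rest => exact ⟨r0, rest, rfl⟩
  have hhead : PySem.List.pyGetD (r0 :: rest) 0 [] = r0 := by
    simp [PySem.List.pyGetD_ofNat']
  simp only [solution_alt, hhead]
  rw [← List.filter_flatMap, flat_eq, List.filter_filter]
  have hcong : ∀ c ∈ pvAll r0.length,
      ((!((PySem.List.pyRange 1 (c.length : Int) 1).any (fun k =>
          (PySem.List.combinations c k.toNat).any (fun sub =>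
            PySem.Set.contains (PySem.Set.ofList
              ((pvAll r0.length).filter (pvIsUniq (r0 :: rest)))) sub)))) &&
        pvIsUniq (r0 :: rest) c) = pvMin (pvIsUniq (r0 :: rest)) c := by
    intro c hc
    have hcR := (mem_pvAll r0.length c).mp hc
    cases hU : pvIsUniq (r0 :: rest) c
    · simp [pvMin, hU]
    · rw [Bool.and_true, pvMin, hU, Bool.true_and, Bool.eq_iff_iff]
      have hXiff : ((PySem.List.pyRange 1 (c.length : Int) 1).any (fun k =>
          (PySem.List.combinations c k.toNat).any (fun sub =>
            PySem.Set.contains (PySem.Set.ofList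
              ((pvAll r0.length).filter (pvIsUniq (r0 :: rest)))) sub))) = true ↔
          ∃ s, s.Sublist c ∧ s ≠ [] ∧ s ≠ c ∧ pvIsUniq (r0 :: rest) s = true := by
        constructor
        · rintro hX
          obtain ⟨k, hk, hX⟩ := List.any_eq_true.mp hX
          obtain ⟨sub, hsubmem, hcont⟩ := List.any_eq_true.mp hX
          obtain ⟨hk1, hk2⟩ := PySem.List.mem_pyRange_one.mp hk
          obtain ⟨hsubc, hsublen⟩ := (PySem.List.mem_combinations_iff _ _ _).mp hsubmem
          have hsubU : pvIsUniq (r0 :: rest) sub = true := by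
            have := (PySem.Set.contains_iff _ _).mp hcont
            rw [PySem.Set.mem_ofList, List.mem_filter] at this
            exact this.2
          have hlen : sub.length < c.length := by omega
          refine ⟨sub, hsubc, ?_, ?_, hsubU⟩
          · intro hnil
            rw [hnil] at hsublen
            simp at hsublen
            omega
          · intro hec
            rw [hec] at hlen
            omega
        · rintro ⟨s, hsc, hsne, hsnc, hsU⟩
          have hs1 : 1 ≤ s.length := List.length_pos_iff.mpr hsne
          have hslt : s.length < c.length :=
            lt_of_le_of_ne hsc.length_le (fun hl => hsnc (hsc.eq_of_length hl))
          refine List.any_eq_true.mpr ⟨(s.length : Int),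
            PySem.List.mem_pyRange_one.mpr ⟨by omega, by omega⟩, ?_⟩
          refine List.any_eq_true.mpr ⟨s, ?_, ?_⟩
          · refine (PySem.List.mem_combinations_iff _ _ _).mpr ⟨hsc, ?_⟩
            omega
          · refine (PySem.Set.contains_iff _ _).mpr ?_
            rw [PySem.Set.mem_ofList, List.mem_filter]
            exact ⟨(mem_pvAll r0.length s).mpr ⟨hsc.trans hcR.1, hsne⟩, hsU⟩
      rw [Bool.not_eq_true', Bool.eq_false_iff, ne_eq, hXiff.not]
      push Not
      rw [List.all_eq_true]
      constructor
      · intro hnone s hsmem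
        have hsc : s.Sublist c := List.mem_sublists.mp hsmem
        by_cases h1 : s = []
        · simp [h1]
        · by_cases h2 : s = c
          · simp [h2]
          · have := hnone s hsc h1 h2
            simp [h1, h2, this]
      · intro hall s hsc hsne hsnc
        have := hall s (List.mem_sublists.mpr hsc)
        simp [hsne, hsnc] at this
        simp [this]
  rw [List.filter_congr hcong]
  simp

-- ===== VERDICT (by name: the statement is the Claim_ definition above) =====
theorem solution_spec : Claim_equal_solution := by
  intro relation _ hpre
  unfold Spec_solution
  rw [solution_eq_filter relation hpre, solution_alt_eq_filter relation hpre]
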